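-- pv_equiv track=rewrite | github.com/MiltFra/AoC2020 | src/day24_1.py | to_cubic
-- ===== SOURCE A (Python) =====
-- def to_cubic(l):
--     x, y, z = 0, 0, 0
--     last = ''
--     for c in l:
--         if c == 's' or c == 'n':
--             last = c
--             continue
--         d = last + c
--         last = ''
--         if d == 'e':
--             x += 1
--             y -= 1
--         elif d == 'w':
--             x -= 1
--             y += 1
--         elif d == 'ne':
--             x += 1
--             z -= 1
--         elif d == 'nw':
--             y += 1
--             z -= 1
--         elif d == 'se':
--             y -= 1
--             z += 1
--         elif d == 'sw':
--             x -= 1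
--             z += 1
--     return (x, y, z)
-- ===== SOURCE B (Python) =====
-- # Tokenize-then-sum: scan the string into direction tokens ([ns]?[ew] with
-- # greedy two-char match), then accumulate each token's delta from a table.
-- DELTAS = {
--     'e':  (1, -1, 0),
--     'w':  (-1, 1, 0),
--     'ne': (1, 0, -1),
--     'nw': (0, 1, -1),
--     'se': (0, -1, 1),
--     'sw': (-1, 0, 1),
-- }
--
--
-- def _tokens(l):
--     i, n = 0, len(l)
--     out = []
--     while i < n:
--         c = l[i]
--         if c in 'ns' and i + 1 < n and l[i + 1] in 'ew':
--             out.append(c + l[i + 1])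
--             i += 2
--         elif c in 'ew':
--             out.append(c)
--             i += 1
--         else:
--             i += 1
--     return out
--
--
-- def to_cubic(l):
--     x, y, z = 0, 0, 0
--     for t in _tokens(l):
--         dx, dy, dz = DELTAS[t]
--         x, y, z = x + dx, y + dy, z + dz
--     return (x, y, z)
-- ===== Notes on version B (the rewrite author's own statement) =====
-- stated objective: idiomatic
-- what changed: Replaces A's char-by-char state machine (pending 'last' prefix plus a six-way if/elif chain) by a greedy [ns]?[ew] tokenizer followed by summing per-token deltas from a lookup table.
import Mathlib
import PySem

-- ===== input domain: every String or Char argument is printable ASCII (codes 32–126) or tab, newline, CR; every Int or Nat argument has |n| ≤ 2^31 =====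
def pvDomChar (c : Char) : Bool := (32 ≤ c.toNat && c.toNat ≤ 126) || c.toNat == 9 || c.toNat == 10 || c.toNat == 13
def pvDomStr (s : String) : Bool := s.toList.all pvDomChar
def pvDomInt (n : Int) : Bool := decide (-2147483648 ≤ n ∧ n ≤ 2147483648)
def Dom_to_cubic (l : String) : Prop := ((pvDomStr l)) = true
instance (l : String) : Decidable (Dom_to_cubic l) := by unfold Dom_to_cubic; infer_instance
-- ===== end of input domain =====

-- B replaces A's char-by-char prefix state machine by a tokenize-then-sum pass
-- (greedy [ns]?[ew] tokenizer plus a delta table); objective: idiomatic, same cost.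

-- ===== PORT A =====
-- one iteration of A's for-loop; state is (last, x, y, z)
def toCubicStep (st : String × Int × Int × Int) (c : Char) : String × Int × Int × Int :=
  let last := st.1
  let x := st.2.1
  let y := st.2.2.1
  let z := st.2.2.2
  if c = 's' ∨ c = 'n' then (String.ofList [c], x, y, z)
  else
    let d := last ++ String.ofList [c]
    if d = "e" then ("", x + 1, y - 1, z)
    else if d = "w" then ("", x - 1, y + 1, z)
    else if d = "ne" then ("", x + 1, y, z - 1)
    else if d = "nw" then ("", x, y + 1, z - 1)
    else if d = "se" then ("", x, y - 1, z + 1)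
    else if d = "sw" then ("", x - 1, y, z + 1)
    else ("", x, y, z)

def to_cubic (l : String) : Int × Int × Int :=
  (l.toList.foldl toCubicStep ("", 0, 0, 0)).2

-- ===== PORT B =====
-- the DELTAS table of Source B
def pvDeltas : PySem.Dict String (Int × Int × Int) :=
  PySem.Dict.ofList
    [("e", (1, -1, 0)), ("w", (-1, 1, 0)), ("ne", (1, 0, -1)),
     ("nw", (0, 1, -1)), ("se", (0, -1, 1)), ("sw", (-1, 0, 1))]

-- _tokens of Source B: greedy left-to-right scan; a two-char token when a prefix
-- 'n'/'s' is immediately followed by 'e'/'w', a one-char token on bare 'e'/'w'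
def pvTokens : List Char → List String
  | [] => []
  | [c] => if c = 'e' ∨ c = 'w' then [String.ofList [c]] else []
  | c :: c2 :: rest =>
    if (c = 'n' ∨ c = 's') ∧ (c2 = 'e' ∨ c2 = 'w') then
      String.ofList [c, c2] :: pvTokens rest
    else if c = 'e' ∨ c = 'w' then
      String.ofList [c] :: pvTokens (c2 :: rest)
    else
      pvTokens (c2 :: rest)

-- DELTAS[t] in Source B is only reached with t a token, hence a key of the table,
-- so Python's KeyError branch is dead; the getD default (0,0,0) is never used.
def to_cubic_alt (l : String) : Int × Int × Int :=
  (pvTokens l.toList).foldl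
    (fun acc t =>
      let d := pvDeltas.getD t (0, 0, 0)
      (acc.1 + d.1, acc.2.1 + d.2.1, acc.2.2 + d.2.2))
    (0, 0, 0)

-- ===== PRECONDITION & SPEC =====
def Spec_to_cubic (l : String) (out : Int × Int × Int) : Prop := out = to_cubic_alt l
instance (l : String) (out : Int × Int × Int) : Decidable (Spec_to_cubic l out) := by unfold Spec_to_cubic; infer_instance

-- ===== CLAIM (what is proved, stated in full; the proofs are below) =====
def Claim_equal_to_cubic : Prop := ∀ (l : String), Dom_to_cubic l → Spec_to_cubic l (to_cubic l)

-- ===== LEMMAS AND PROOFS =====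

theorem pvOfList_inj (l m : List Char) : (String.ofList l = String.ofList m) ↔ l = m :=
  ⟨fun h => by simpa using congrArg String.toList h, fun h => h ▸ rfl⟩

theorem pvOfList_append (l m : List Char) :
    String.ofList l ++ String.ofList m = String.ofList (l ++ m) := by
  apply String.toList_injective; simp

-- a char that is none of 's','n','e','w' never matches: the step drops it and
-- clears `last`, whatever `last` was
theorem pvStep_none (c : Char) (hs : c ≠ 's') (hn : c ≠ 'n') (he : c ≠ 'e') (hw : c ≠ 'w')
    (last : String) (x y z : Int) :
    toCubicStep (last, x, y, z) c = ("", x, y, z) := by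
  have hkey : ∀ (k : List Char) (kc : Char), kc = 'e' ∨ kc = 'w' →
      (last ++ String.ofList [c] = String.ofList (k ++ [kc])) = False := by
    intro k kc hkc
    rw [show last = String.ofList last.toList from (String.ofList_toList).symm,
        pvOfList_append]
    simp only [pvOfList_inj, eq_iff_iff, iff_false]
    intro h
    have h2 := congrArg List.getLast? h
    simp only [List.getLast?_concat, Option.some.injEq] at h2
    rcases hkc with h' | h' <;> subst h' <;> subst h2 <;> simp_all
  simp only [toCubicStep, hs, hn, or_self, if_false,
    show ("e" : String) = String.ofList ([] ++ ['e']) from rfl,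
    show ("w" : String) = String.ofList ([] ++ ['w']) from rfl,
    show ("ne" : String) = String.ofList (['n'] ++ ['e']) from rfl,
    show ("nw" : String) = String.ofList (['n'] ++ ['w']) from rfl,
    show ("se" : String) = String.ofList (['s'] ++ ['e']) from rfl,
    show ("sw" : String) = String.ofList (['s'] ++ ['w']) from rfl,
    hkey [] 'e' (Or.inl rfl), hkey [] 'w' (Or.inr rfl),
    hkey ['n'] 'e' (Or.inl rfl), hkey ['n'] 'w' (Or.inr rfl),
    hkey ['s'] 'e' (Or.inl rfl), hkey ['s'] 'w' (Or.inr rfl)]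

-- a char that is not 'e'/'w' never completes a token, so the step result does
-- not depend on the pending prefix `last`
theorem pvStep_indep (c : Char) (he : c ≠ 'e') (hw : c ≠ 'w')
    (last : String) (x y z : Int) :
    toCubicStep (last, x, y, z) c = toCubicStep ("", x, y, z) c := by
  by_cases hsn : c = 's' ∨ c = 'n'
  · simp [toCubicStep, hsn]
  · rw [not_or] at hsn
    rw [pvStep_none c hsn.1 hsn.2 he hw, pvStep_none c hsn.1 hsn.2 he hw]

-- B's fold step, written out as a named function (definitionally equal to the
-- lambda inside to_cubic_alt; used only by the proofs)
def pvAdd (acc : Int × Int × Int) (t : String) : Int × Int × Int :=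
  let d := pvDeltas.getD t (0, 0, 0)
  (acc.1 + d.1, acc.2.1 + d.2.1, acc.2.2 + d.2.2)

theorem pvAddE (x y z : Int) : pvAdd (x, y, z) (String.ofList ['e']) = (x + 1, y - 1, z) := by
  show ((x + 1 : Int), y + (-1 : Int), z + (0 : Int)) = _; simp only [Prod.mk.injEq, true_and]; omega
theorem pvAddW (x y z : Int) : pvAdd (x, y, z) (String.ofList ['w']) = (x - 1, y + 1, z) := by
  show ((x + (-1) : Int), y + (1 : Int), z + (0 : Int)) = _; simp only [Prod.mk.injEq, true_and]; omega
theorem pvAddNE (x y z : Int) : pvAdd (x, y, z) (String.ofList ['n', 'e']) = (x + 1, y, z - 1) := by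
  show ((x + 1 : Int), y + (0 : Int), z + (-1 : Int)) = _; simp only [Prod.mk.injEq, true_and]; omega
theorem pvAddNW (x y z : Int) : pvAdd (x, y, z) (String.ofList ['n', 'w']) = (x, y + 1, z - 1) := by
  show ((x + 0 : Int), y + (1 : Int), z + (-1 : Int)) = _; simp only [Prod.mk.injEq, true_and]; omega
theorem pvAddSE (x y z : Int) : pvAdd (x, y, z) (String.ofList ['s', 'e']) = (x, y - 1, z + 1) := by
  show ((x + 0 : Int), y + (-1 : Int), z + (1 : Int)) = _; simp only [Prod.mk.injEq, and_true]; omega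
theorem pvAddSW (x y z : Int) : pvAdd (x, y, z) (String.ofList ['s', 'w']) = (x - 1, y, z + 1) := by
  show ((x + (-1) : Int), y + (0 : Int), z + (1 : Int)) = _; simp only [Prod.mk.injEq, and_true]; omega

-- the loop invariant: running A's state machine from a cleared prefix over cs
-- produces exactly the sum of the deltas of the tokens of cs
theorem pvMain (cs : List Char) : ∀ (x y z : Int),
    (cs.foldl toCubicStep ("", x, y, z)).2 =
    (pvTokens cs).foldl pvAdd (x, y, z) := by
  induction cs using pvTokens.induct with
  | case1 => intro x y z; rfl
  | case2 c hew =>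
    intro x y z
    rcases hew with h | h <;> subst h
    · rw [show pvTokens ['e'] = [String.ofList ['e']] from rfl]
      simp only [List.foldl_cons, List.foldl_nil,
        show toCubicStep ("", x, y, z) 'e' = ("", x + 1, y - 1, z) from rfl, pvAddE]
    · rw [show pvTokens ['w'] = [String.ofList ['w']] from rfl]
      simp only [List.foldl_cons, List.foldl_nil,
        show toCubicStep ("", x, y, z) 'w' = ("", x - 1, y + 1, z) from rfl, pvAddW]
  | case3 c hew =>
    intro x y z
    rw [not_or] at hew
    rw [show pvTokens [c] = [] by simp [pvTokens, hew.1, hew.2]]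
    by_cases hsn : c = 's' ∨ c = 'n'
    · rcases hsn with h | h <;> subst h <;> rfl
    · rw [not_or] at hsn
      show (toCubicStep ("", x, y, z) c).2 = _
      rw [pvStep_none c hsn.1 hsn.2 hew.1 hew.2]
      rfl
  | case4 c c2 rest hcond ih =>
    intro x y z
    obtain ⟨h1, h2⟩ := hcond
    rw [show pvTokens (c :: c2 :: rest) = String.ofList [c, c2] :: pvTokens rest by
          simp [pvTokens, h1, h2]]
    rcases h1 with h1 | h1 <;> rcases h2 with h2 | h2 <;> subst h1 <;> subst h2
    · simp only [List.foldl_cons,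
        show toCubicStep ("", x, y, z) 'n' = (String.ofList ['n'], x, y, z) from rfl,
        show toCubicStep (String.ofList ['n'], x, y, z) 'e' = ("", x + 1, y, z - 1) from rfl,
        pvAddNE]
      exact ih (x + 1) y (z - 1)
    · simp only [List.foldl_cons,
        show toCubicStep ("", x, y, z) 'n' = (String.ofList ['n'], x, y, z) from rfl,
        show toCubicStep (String.ofList ['n'], x, y, z) 'w' = ("", x, y + 1, z - 1) from rfl,
        pvAddNW]
      exact ih x (y + 1) (z - 1)
    · simp only [List.foldl_cons,
        show toCubicStep ("", x, y, z) 's' = (String.ofList ['s'], x, y, z) from rfl,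
        show toCubicStep (String.ofList ['s'], x, y, z) 'e' = ("", x, y - 1, z + 1) from rfl,
        pvAddSE]
      exact ih x (y - 1) (z + 1)
    · simp only [List.foldl_cons,
        show toCubicStep ("", x, y, z) 's' = (String.ofList ['s'], x, y, z) from rfl,
        show toCubicStep (String.ofList ['s'], x, y, z) 'w' = ("", x - 1, y, z + 1) from rfl,
        pvAddSW]
      exact ih (x - 1) y (z + 1)
  | case5 c c2 rest hcond hew ih =>
    intro x y z
    rw [show pvTokens (c :: c2 :: rest) = String.ofList [c] :: pvTokens (c2 :: rest) by
          simp only [pvTokens]; rw [if_neg hcond, if_pos hew]]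
    rcases hew with h | h <;> subst h
    · simp only [List.foldl_cons,
        show toCubicStep ("", x, y, z) 'e' = ("", x + 1, y - 1, z) from rfl, pvAddE]
      exact ih (x + 1) (y - 1) z
    · simp only [List.foldl_cons,
        show toCubicStep ("", x, y, z) 'w' = ("", x - 1, y + 1, z) from rfl, pvAddW]
      exact ih (x - 1) (y + 1) z
  | case6 c c2 rest hcond hew ih =>
    intro x y z
    rw [show pvTokens (c :: c2 :: rest) = pvTokens (c2 :: rest) by
          simp only [pvTokens]; rw [if_neg hcond, if_neg hew]]
    rw [not_or] at hew
    by_cases hsn : c = 's' ∨ c = 'n'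
    · -- c sets the prefix, but the following char cannot complete a token with it
      have hc2 : ¬ (c2 = 'e' ∨ c2 = 'w') := fun h2 =>
        hcond ⟨hsn.elim (fun h => Or.inr h) (fun h => Or.inl h), h2⟩
      rw [not_or] at hc2
      have hfirst : toCubicStep ("", x, y, z) c = (String.ofList [c], x, y, z) := by
        rcases hsn with h | h <;> subst h <;> rfl
      show (List.foldl toCubicStep (toCubicStep ("", x, y, z) c) (c2 :: rest)).2 = _
      rw [hfirst]
      show (List.foldl toCubicStep (toCubicStep (String.ofList [c], x, y, z) c2) rest).2 = _
      rw [pvStep_indep c2 hc2.1 hc2.2]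
      exact ih x y z
    · rw [not_or] at hsn
      show (List.foldl toCubicStep (toCubicStep ("", x, y, z) c) (c2 :: rest)).2 = _
      rw [pvStep_none c hsn.1 hsn.2 hew.1 hew.2]
      exact ih x y z

-- ===== VERDICT (by name: the statement is the Claim_ definition above) =====
theorem to_cubic_spec : Claim_equal_to_cubic := by
  intro l _
  unfold Spec_to_cubic to_cubic to_cubic_alt
  exact pvMain l.toList 0 0 0
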